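-- pv_equiv track=rewrite | github.com/Kiruthika-1210/CodeSage-Static-Code-Analysis-Refactoring-Platform | Code/backend/scoring/documentation.py | analyze_documentation
-- ===== SOURCE A (Python) =====
-- def analyze_documentation(code: str):
--     slices = code.split("\n")
--     penalty = 0
--
--     # 1. CHECK MODULE DOCSTRING
--     first_real_line = ""
--     for line in slices:
--         stripped = line.strip()
--         if stripped and not stripped.startswith("#"):
--             first_real_line = stripped
--             break
--
--     # Missing module docstring
--     if not (first_real_line.startswith('"""') or first_real_line.startswith("'''")):
--         penalty += 10
--
--     # 2. FUNCTION & CLASS DOCSTRING CHECKS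
--     i = 0
--     n = len(slices)
--
--     while i < n:
--         line = slices[i].strip()
--
--         # FUNCTION DOCSTRING CHECK
--         if line.startswith("def "):
--             # Extract parameters
--             fn_signature = line
--             params_section = fn_signature[fn_signature.find("(") + 1 : fn_signature.find(")")]
--             params = [p.strip() for p in params_section.split(",") if p.strip()]
--
--             # Move to next meaningful line
--             j = i + 1
--             while j < n and slices[j].strip() == "":
--                 j += 1
--
--             # Check if next meaningful line is a docstring
--             if j >= n or not (slices[j].strip().startswith('"""') or slices[j].strip().startswith("'''")):
--                 penalty += 5
--             else:
--                 # Extract docstring content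
--                 doc = slices[j].strip()
--
--                 # Check short docstring
--                 if doc in ['"""', "'''"]:
--                     penalty += 3
--                 elif len(doc.replace('"', "").replace("'", "").strip()) < 3:
--                     penalty += 3
--
--                 # Check parameter names appear in docstring
--                 doc_lower = doc.lower()
--                 for p in params:
--                     if p and p not in doc_lower:
--                         penalty += 1  # small penalty per missing param
--
--             i = j
--
--         # CLASS DOCSTRING CHECK
--         elif line.startswith("class "):
--             j = i + 1
--             while j < n and slices[j].strip() == "":
--                 j += 1
--
--             if j >= n or not (slices[j].strip().startswith('"""') or slices[j].strip().startswith("'''")):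
--                 penalty += 5
--
--             i = j
--         else:
--             i += 1
--
--     # FINAL DOCUMENTATION SCORE
--     documentation_score = max(0, 25 - penalty)
--
--     return {
--         "documentation_score": documentation_score
--     }
-- ===== SOURCE B (Python) =====
-- def _def_penalty(sig, nxt):
--     if nxt is None or not nxt.startswith(('"""', "'''")):
--         return 5
--     pen = 3 if nxt in ('"""', "'''") or len(nxt.replace('"', "").replace("'", "").strip()) < 3 else 0
--     section = sig[sig.find("(") + 1 : sig.find(")")]
--     low = nxt.lower()
--     return pen + sum(1 for p in (q.strip() for q in section.split(",")) if p and p not in low)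
--
--
-- def _class_penalty(nxt):
--     return 0 if nxt is not None and nxt.startswith(('"""', "'''")) else 5
--
--
-- def analyze_documentation(code: str):
--     # one backward pass: the state (nxt, first) replaces A's forward lookahead scans
--     penalty, nxt, first = 0, None, ""
--     for raw in reversed(code.split("\n")):
--         s = raw.strip()
--         if s.startswith("def "):
--             penalty += _def_penalty(s, nxt)
--         elif s.startswith("class "):
--             penalty += _class_penalty(nxt)
--         if s:
--             nxt = s
--             if not s.startswith("#"):
--                 first = s
--     if not first.startswith(('"""', "'''")):
--         penalty += 10
--     return {"documentation_score": max(0, 25 - penalty)}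
-- ===== Notes on version B (the rewrite author's own statement) =====
-- stated objective: alternative
-- what changed: A's forward index-jumping while loop with an inner lookahead scan for the next meaningful line is replaced by a single backward pass whose carried state (next meaningful line, first real line) eliminates every lookahead scan.
import Mathlib
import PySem

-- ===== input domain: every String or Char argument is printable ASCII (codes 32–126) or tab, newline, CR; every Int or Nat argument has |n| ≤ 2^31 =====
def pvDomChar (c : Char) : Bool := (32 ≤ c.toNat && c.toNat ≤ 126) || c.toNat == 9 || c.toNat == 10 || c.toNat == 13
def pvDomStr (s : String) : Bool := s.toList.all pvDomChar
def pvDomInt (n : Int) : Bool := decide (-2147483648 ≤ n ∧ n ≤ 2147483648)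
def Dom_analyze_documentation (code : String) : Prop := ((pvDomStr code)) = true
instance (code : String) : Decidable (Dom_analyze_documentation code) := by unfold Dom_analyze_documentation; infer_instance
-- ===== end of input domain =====

-- B replaces A's forward index-jumping loop with lookahead scans by ONE backward pass
-- whose carried state (next meaningful line, first real line) removes every lookahead.
-- Objective: alternative decomposition, same cost.

-- ===== PORT A =====
-- str.split(sep) for a non-empty literal sep (thin wrapper over PySem.Chars.splitOn; used by both ports)
def pvSplitStr (s sep : String) : List String := (PySem.Chars.splitOn s.toList sep.toList).map String.ofList

-- A: scan for the first non-blank, non-'#' line (stripped), "" if none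
def pvFirstRealA : List String → String
  | [] => ""
  | l :: ls =>
    let stripped := PySem.Str.strip l
    if stripped ≠ "" ∧ ¬ (PySem.Str.startswith stripped "#" = true) then stripped
    else pvFirstRealA ls

-- A: the inner `while j < n and slices[j].strip() == "": j += 1`
def pvNextA (slices : List String) (j : Nat) : Nat :=
  if h : j < slices.length then
    if PySem.Str.strip slices[j] = "" then pvNextA slices (j + 1) else j
  else j
termination_by slices.length - j

lemma pvNextA_ge (slices : List String) (j : Nat) : j ≤ pvNextA slices j := by
  induction hk : slices.length - j using Nat.strong_induction_on generalizing j with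
  | _ k ih =>
    unfold pvNextA
    split
    · split
      · exact le_trans (Nat.le_succ j) (ih (slices.length - (j + 1)) (by omega) (j + 1) rfl)
      · exact le_refl j
    · exact le_refl j

-- A: the main `while i < n` loop carrying the running penalty
def pvLoopA (slices : List String) (i : Nat) (penalty : Int) : Int :=
  if h : i < slices.length then
    let line := PySem.Str.strip slices[i]
    if PySem.Str.startswith line "def " = true then
      let paramsSection := PySem.Str.slice line (some (PySem.Str.find line "(" + 1)) (some (PySem.Str.find line ")"))
      let params := ((pvSplitStr paramsSection ",").map PySem.Str.strip).filter (fun p => p ≠ "")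
      let j := pvNextA slices (i + 1)
      let penalty' :=
        if h2 : j < slices.length then
          let doc := PySem.Str.strip slices[j]
          if ¬ (PySem.Str.startswith doc "\"\"\"" = true ∨ PySem.Str.startswith doc "'''" = true) then
            penalty + 5
          else
            let p3 :=
              if doc = "\"\"\"" ∨ doc = "'''" then penalty + 3
              else if PySem.Str.len (PySem.Str.strip (PySem.Str.replace (PySem.Str.replace doc "\"" "") "'" "")) < 3 then penalty + 3
              else penalty
            let docLower := PySem.Str.lower doc
            params.foldl (fun acc p => if p ≠ "" ∧ ¬ (PySem.Str.isIn p docLower = true) then acc + 1 else acc) p3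
        else penalty + 5
      pvLoopA slices j penalty'
    else if PySem.Str.startswith line "class " = true then
      let j := pvNextA slices (i + 1)
      let penalty' :=
        if h2 : j < slices.length then
          let doc := PySem.Str.strip slices[j]
          if ¬ (PySem.Str.startswith doc "\"\"\"" = true ∨ PySem.Str.startswith doc "'''" = true) then penalty + 5
          else penalty
        else penalty + 5
      pvLoopA slices j penalty'
    else pvLoopA slices (i + 1) penalty
  else penalty
termination_by slices.length - i
decreasing_by
  · have := pvNextA_ge slices (i + 1); omega
  · have := pvNextA_ge slices (i + 1); omega
  · omega

def analyze_documentation (code : String) : List (String × Int) :=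
  let slices := pvSplitStr code "\n"
  let firstRealLine := pvFirstRealA slices
  let penalty0 : Int :=
    if ¬ (PySem.Str.startswith firstRealLine "\"\"\"" = true ∨ PySem.Str.startswith firstRealLine "'''" = true)
    then 10 else 0
  let penalty := pvLoopA slices 0 penalty0
  [("documentation_score", max 0 (25 - penalty))]

-- ===== PORT B =====
def pvDocStartB (s : String) : Bool :=
  PySem.Str.startswith s "\"\"\"" || PySem.Str.startswith s "'''"

-- B: `_def_penalty(sig, nxt)`
def pvDefPenB (sig : String) (nxt : Option String) : Int :=
  match nxt with
  | none => 5
  | some doc =>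
    if ¬ (pvDocStartB doc = true) then 5
    else
      let pen : Int :=
        if doc = "\"\"\"" ∨ doc = "'''" ∨
           PySem.Str.len (PySem.Str.strip (PySem.Str.replace (PySem.Str.replace doc "\"" "") "'" "")) < 3
        then 3 else 0
      let section_ := PySem.Str.slice sig (some (PySem.Str.find sig "(" + 1)) (some (PySem.Str.find sig ")"))
      let low := PySem.Str.lower doc
      pen + (((pvSplitStr section_ ",").map PySem.Str.strip).countP
               (fun p => p ≠ "" ∧ ¬ (PySem.Str.isIn p low = true)) : Int)

-- B: `_class_penalty(nxt)`
def pvClassPenB (nxt : Option String) : Int :=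
  match nxt with
  | some doc => if pvDocStartB doc = true then 0 else 5
  | none => 5

-- B: one iteration of the backward pass; state = (penalty, next meaningful line, first real line)
def pvStepScanB (st : Int × Option String × String) (raw : String) : Int × Option String × String :=
  let s := PySem.Str.strip raw
  let pen : Int :=
    if PySem.Str.startswith s "def " = true then st.1 + pvDefPenB s st.2.1
    else if PySem.Str.startswith s "class " = true then st.1 + pvClassPenB st.2.1
    else st.1
  if s = "" then (pen, st.2.1, st.2.2)
  else (pen, some s, if ¬ (PySem.Str.startswith s "#" = true) then s else st.2.2)

def analyze_documentation_alt (code : String) : List (String × Int) :=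
  let lines := pvSplitStr code "\n"
  let st := lines.reverse.foldl pvStepScanB (0, none, "")
  let penalty := if ¬ (pvDocStartB st.2.2 = true) then st.1 + 10 else st.1
  [("documentation_score", max 0 (25 - penalty))]

-- ===== PRECONDITION & SPEC =====
def Spec_analyze_documentation (code : String) (out : List (String × Int)) : Prop := out = analyze_documentation_alt code
instance (code : String) (out : List (String × Int)) : Decidable (Spec_analyze_documentation code out) := by unfold Spec_analyze_documentation; infer_instance

-- ===== CLAIM (what is proved, stated in full; the proofs are below) =====
def Claim_equal_analyze_documentation : Prop := ∀ (code : String), Dom_analyze_documentation code → Spec_analyze_documentation code (analyze_documentation code)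

-- ===== LEMMAS AND PROOFS =====
-- proof-side helpers: an abstract "record" view of the def/class lines with their next meaningful line
def pvNextDocP : List String → Option String
  | [] => none
  | l :: ls =>
    let s := PySem.Str.strip l
    if s = "" then pvNextDocP ls else some s

def pvFirstRealP : List String → String
  | [] => ""
  | l :: ls =>
    let s := PySem.Str.strip l
    if s ≠ "" ∧ ¬ (PySem.Str.startswith s "#" = true) then s else pvFirstRealP ls

def pvRecordsP : List String → List (Bool × String × Option String)
  | [] => []
  | l :: rest =>
    let s := PySem.Str.strip l
    if PySem.Str.startswith s "def " = true then (true, s, pvNextDocP rest) :: pvRecordsP rest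
    else if PySem.Str.startswith s "class " = true then (false, s, pvNextDocP rest) :: pvRecordsP rest
    else pvRecordsP rest

def pvStepP (pen : Int) (r : Bool × String × Option String) : Int :=
  match r with
  | (true, s, d) => pen + pvDefPenB s d
  | (false, _, d) => pen + pvClassPenB d

lemma firstReal_eq (ls : List String) : pvFirstRealA ls = pvFirstRealP ls := by
  induction ls with
  | nil => rfl
  | cons l ls ih => simp only [pvFirstRealA, pvFirstRealP, ih]

-- skipping blanks does not change the collected records
lemma records_next (slices : List String) (j : Nat) :
    pvRecordsP (slices.drop (pvNextA slices j)) = pvRecordsP (slices.drop j) := by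
  induction hk : slices.length - j using Nat.strong_induction_on generalizing j with
  | _ k ih =>
    unfold pvNextA
    split
    · rename_i h
      split
      · rename_i hblank
        rw [ih (slices.length - (j + 1)) (by omega) (j + 1) rfl]
        rw [List.drop_eq_getElem_cons h]
        have h1 : PySem.Chars.startswith [] ['d','e','f',' '] = false := by decide
        have h2 : PySem.Chars.startswith [] ['c','l','a','s','s',' '] = false := by decide
        simp [pvRecordsP, hblank, h1, h2]
      · rfl
    · rfl

-- the next meaningful line, as the record view computes it vs A's index
lemma nextDoc_eq (slices : List String) (j : Nat) :
    pvNextDocP (slices.drop j) = (slices[pvNextA slices j]?).map PySem.Str.strip := by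
  induction hk : slices.length - j using Nat.strong_induction_on generalizing j with
  | _ k ih =>
    unfold pvNextA
    split
    · rename_i h
      rw [List.drop_eq_getElem_cons h]
      by_cases hblank : PySem.Str.strip slices[j] = ""
      · simp only [pvNextDocP, hblank]
        exact ih (slices.length - (j + 1)) (by omega) (j + 1) rfl
      · simp [pvNextDocP, hblank, List.getElem?_eq_getElem h]
    · rename_i h
      rw [List.drop_of_length_le (by omega : slices.length ≤ j), List.getElem?_eq_none (by omega : slices.length ≤ j)]
      rfl

-- A's per-parameter penalty loop (over the pre-filtered list) equals B's count over the raw list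
lemma params_fold_eq (dl : String) (l : List String) (x : Int) :
    (l.filter (fun p => p ≠ "")).foldl
        (fun acc p => if p ≠ "" ∧ ¬ (PySem.Str.isIn p dl = true) then acc + 1 else acc) x
      = x + (l.countP (fun p => p ≠ "" ∧ ¬ (PySem.Str.isIn p dl = true)) : Int) := by
  induction l generalizing x with
  | nil => simp
  | cons p l ih =>
    rw [List.countP_cons]
    by_cases hp : p = ""
    · rw [List.filter_cons_of_neg (by simp [hp]), ih]
      simp [hp]
    · rw [List.filter_cons_of_pos (by simp [hp]), List.foldl_cons]
      by_cases hc : PySem.Str.isIn p dl = true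
      · rw [if_neg (fun hand => hand.2 hc), ih]
        have hc' : PySem.Chars.isIn p.toList dl.toList = true := by simpa using hc
        simp [hc']
      · rw [if_pos ⟨hp, hc⟩, ih]
        have hc' : PySem.Chars.isIn p.toList dl.toList = false := by simpa using hc
        simp [hp, hc']
        omega

-- A's def-branch penalty update (docstring line present) equals pen + B's _def_penalty
lemma stepP_def (pen : Int) (line doc : String) :
    (if ¬ (PySem.Str.startswith doc "\"\"\"" = true ∨ PySem.Str.startswith doc "'''" = true) then pen + 5
     else
       (((pvSplitStr (PySem.Str.slice line (some (PySem.Str.find line "(" + 1)) (some (PySem.Str.find line ")"))) ",").map PySem.Str.strip).filter (fun p => p ≠ "")).foldl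
         (fun acc p => if p ≠ "" ∧ ¬ (PySem.Str.isIn p (PySem.Str.lower doc) = true) then acc + 1 else acc)
         (if doc = "\"\"\"" ∨ doc = "'''" then pen + 3
          else if PySem.Str.len (PySem.Str.strip (PySem.Str.replace (PySem.Str.replace doc "\"" "") "'" "")) < 3 then pen + 3
          else pen))
    = pen + pvDefPenB line (some doc) := by
  rw [params_fold_eq]
  simp only [pvDefPenB]
  by_cases hds : pvDocStartB doc = true
  · have hds' : PySem.Str.startswith doc "\"\"\"" = true ∨ PySem.Str.startswith doc "'''" = true := by
      simpa [pvDocStartB] using hds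
    rw [if_neg (not_not_intro hds'), if_neg (not_not_intro hds)]
    have h3 : (if doc = "\"\"\"" ∨ doc = "'''" then pen + 3
          else if PySem.Str.len (PySem.Str.strip (PySem.Str.replace (PySem.Str.replace doc "\"" "") "'" "")) < 3 then pen + 3
          else pen)
        = pen + (if doc = "\"\"\"" ∨ doc = "'''" ∨ PySem.Str.len (PySem.Str.strip (PySem.Str.replace (PySem.Str.replace doc "\"" "") "'" "")) < 3 then (3:Int) else 0) := by
      split
      · rename_i hq
        rw [if_pos (hq.elim Or.inl (fun h => Or.inr (Or.inl h)))]
      · rename_i hq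
        split
        · rename_i hlen
          rw [if_pos (Or.inr (Or.inr hlen))]
        · rename_i hlen
          rw [if_neg (by tauto), add_zero]
    rw [h3]
    ring
  · have hds' : ¬ (PySem.Str.startswith doc "\"\"\"" = true ∨ PySem.Str.startswith doc "'''" = true) := by
      simpa [pvDocStartB] using hds
    rw [if_pos hds', if_pos hds]

-- A's class-branch penalty update (docstring line present) equals pen + B's _class_penalty
lemma stepP_class (pen : Int) (doc : String) :
    (if ¬ (PySem.Str.startswith doc "\"\"\"" = true ∨ PySem.Str.startswith doc "'''" = true) then pen + 5 else pen)
    = pen + pvClassPenB (some doc) := by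
  simp only [pvClassPenB]
  by_cases hds : pvDocStartB doc = true
  · have hds' : PySem.Str.startswith doc "\"\"\"" = true ∨ PySem.Str.startswith doc "'''" = true := by
      simpa [pvDocStartB] using hds
    rw [if_neg (not_not_intro hds'), if_pos hds]
    simp
  · have hds' : ¬ (PySem.Str.startswith doc "\"\"\"" = true ∨ PySem.Str.startswith doc "'''" = true) := by
      simpa [pvDocStartB] using hds
    rw [if_pos hds', if_neg hds]

-- the main loop of A computes the fold of pvStepP over the records of the remaining lines
set_option maxHeartbeats 2000000 in
lemma loopA_eq (slices : List String) (i : Nat) (pen : Int) :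
    pvLoopA slices i pen = (pvRecordsP (slices.drop i)).foldl pvStepP pen := by
  induction hk : slices.length - i using Nat.strong_induction_on generalizing i pen with
  | _ k ih =>
    unfold pvLoopA
    split
    · rename_i h
      rw [List.drop_eq_getElem_cons h]
      dsimp only
      by_cases hdef : PySem.Str.startswith (PySem.Str.strip slices[i]) "def " = true
      · have hrec : pvRecordsP (slices[i] :: slices.drop (i+1))
            = (true, PySem.Str.strip slices[i], pvNextDocP (slices.drop (i+1))) :: pvRecordsP (slices.drop (i+1)) := by
          have h' : PySem.Chars.startswith (PySem.Chars.strip slices[i].toList) ['d','e','f',' '] = true := by simpa using hdef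
          simp [pvRecordsP, h']
        rw [if_pos hdef, hrec, List.foldl_cons,
          ih (slices.length - pvNextA slices (i + 1)) (by have := pvNextA_ge slices (i+1); omega) _ _ rfl,
          ← records_next slices (i + 1)]
        refine congrArg (fun z => List.foldl pvStepP z (pvRecordsP (List.drop (pvNextA slices (i + 1)) slices))) ?_
        by_cases h2 : pvNextA slices (i + 1) < slices.length
        · have hd : pvNextDocP (slices.drop (i+1)) = some (PySem.Str.strip slices[pvNextA slices (i + 1)]) := by
            rw [nextDoc_eq, List.getElem?_eq_getElem h2, Option.map_some]
          rw [dif_pos h2, hd]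
          exact stepP_def pen (PySem.Str.strip slices[i]) (PySem.Str.strip slices[pvNextA slices (i + 1)])
        · have hd : pvNextDocP (slices.drop (i+1)) = none := by
            rw [nextDoc_eq, List.getElem?_eq_none (by omega : slices.length ≤ pvNextA slices (i + 1)), Option.map_none]
          rw [dif_neg h2, hd]
          rfl
      · by_cases hcls : PySem.Str.startswith (PySem.Str.strip slices[i]) "class " = true
        · have hrec : pvRecordsP (slices[i] :: slices.drop (i+1))
              = (false, PySem.Str.strip slices[i], pvNextDocP (slices.drop (i+1))) :: pvRecordsP (slices.drop (i+1)) := by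
            have hd' : PySem.Chars.startswith (PySem.Chars.strip slices[i].toList) ['d','e','f',' '] = false := by simpa using hdef
            have hc' : PySem.Chars.startswith (PySem.Chars.strip slices[i].toList) ['c','l','a','s','s',' '] = true := by simpa using hcls
            simp [pvRecordsP, hd', hc']
          rw [if_neg hdef, if_pos hcls, hrec, List.foldl_cons,
            ih (slices.length - pvNextA slices (i + 1)) (by have := pvNextA_ge slices (i+1); omega) _ _ rfl,
            ← records_next slices (i + 1)]
          refine congrArg (fun z => List.foldl pvStepP z (pvRecordsP (List.drop (pvNextA slices (i + 1)) slices))) ?_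
          simp only [pvStepP]
          by_cases h2 : pvNextA slices (i + 1) < slices.length
          · have hd : pvNextDocP (slices.drop (i+1)) = some (PySem.Str.strip slices[pvNextA slices (i + 1)]) := by
              rw [nextDoc_eq, List.getElem?_eq_getElem h2, Option.map_some]
            rw [dif_pos h2, hd]
            exact stepP_class pen (PySem.Str.strip slices[pvNextA slices (i + 1)])
          · have hd : pvNextDocP (slices.drop (i+1)) = none := by
              rw [nextDoc_eq, List.getElem?_eq_none (by omega : slices.length ≤ pvNextA slices (i + 1)), Option.map_none]
            rw [dif_neg h2, hd]
            rfl
        · have hrec : pvRecordsP (slices[i] :: slices.drop (i+1)) = pvRecordsP (slices.drop (i+1)) := by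
            have hd' : PySem.Chars.startswith (PySem.Chars.strip slices[i].toList) ['d','e','f',' '] = false := by simpa using hdef
            have hc' : PySem.Chars.startswith (PySem.Chars.strip slices[i].toList) ['c','l','a','s','s',' '] = false := by simpa using hcls
            simp [pvRecordsP, hd', hc']
          rw [if_neg hdef, if_neg hcls, hrec]
          exact ih (slices.length - (i + 1)) (by omega) (i + 1) pen rfl
    · rename_i h
      rw [List.drop_of_length_le (by omega)]
      rfl

-- pvStepP is additive in the accumulator, hence the fold shifts
lemma stepP_shift (x y : Int) (r : Bool × String × Option String) :
    pvStepP (x + y) r = x + pvStepP y r := by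
  obtain ⟨b, s, d⟩ := r; cases b <;> simp only [pvStepP] <;> ring

lemma foldl_stepP_shift (rs : List (Bool × String × Option String)) (x y : Int) :
    rs.foldl pvStepP (x + y) = x + rs.foldl pvStepP y := by
  induction rs generalizing y with
  | nil => rfl
  | cons r rs ih => simp only [List.foldl_cons, stepP_shift, ih]

-- a line cannot start with both 'def '/'class ' and '#'
lemma no_hash_def {t : List Char} (h1 : ['d','e','f',' '] <+: t) (h2 : ['#'] <+: t) : False := by
  obtain ⟨t1, rfl⟩ := h1
  simp [List.cons_prefix_cons] at h2

lemma no_hash_class {t : List Char} (h1 : ['c','l','a','s','s',' '] <+: t) (h2 : ['#'] <+: t) : False := by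
  obtain ⟨t1, rfl⟩ := h1
  simp [List.cons_prefix_cons] at h2

-- pull the head record's contribution out of the fold
lemma foldl_recs_cons (r : Bool × String × Option String) (rs : List (Bool × String × Option String)) :
    List.foldl pvStepP 0 (r :: rs) = List.foldl pvStepP 0 rs + pvStepP 0 r := by
  rw [List.foldl_cons, show pvStepP 0 r = pvStepP 0 r + 0 by ring, foldl_stepP_shift]
  ring

-- B's backward pass computes exactly (fold of the records from 0, next meaningful line, first real line)
lemma scan_eq (lines : List String) :
    lines.reverse.foldl pvStepScanB (0, none, "")
      = ((pvRecordsP lines).foldl pvStepP 0, pvNextDocP lines, pvFirstRealP lines) := by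
  induction lines with
  | nil => rfl
  | cons l rest ih =>
    rw [List.reverse_cons, List.foldl_append, ih, List.foldl_cons, List.foldl_nil]
    simp only [pvStepScanB, pvRecordsP, pvNextDocP, pvFirstRealP]
    split_ifs <;>
      first
        | rfl
        | (exfalso; simp_all [PySem.Str.startswith, PySem.Chars.startswith]
           first
             | done
             | exact no_hash_def (by assumption) (by assumption)
             | exact no_hash_class (by assumption) (by assumption))
        | (simp only [foldl_recs_cons, pvStepP, Prod.mk.injEq]
           simp only [and_true]
           ring)

-- ===== VERDICT (by name: the statement is the Claim_ definition above) =====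
theorem analyze_documentation_spec : Claim_equal_analyze_documentation := by
  intro code _
  simp only [Spec_analyze_documentation, analyze_documentation, analyze_documentation_alt]
  rw [firstReal_eq, loopA_eq, scan_eq]
  simp only [List.drop_zero]
  by_cases h : pvDocStartB (pvFirstRealP (pvSplitStr code "\n")) = true
  · have h' : PySem.Str.startswith (pvFirstRealP (pvSplitStr code "\n")) "\"\"\"" = true ∨ PySem.Str.startswith (pvFirstRealP (pvSplitStr code "\n")) "'''" = true := by
      simpa [pvDocStartB] using h
    rw [if_neg (not_not_intro h'), if_neg (not_not_intro h)]
  · have h' : ¬ (PySem.Str.startswith (pvFirstRealP (pvSplitStr code "\n")) "\"\"\"" = true ∨ PySem.Str.startswith (pvFirstRealP (pvSplitStr code "\n")) "'''" = true) := by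
      simpa [pvDocStartB] using h
    rw [if_pos h', if_pos h]
    rw [show ((10:Int) = 10 + 0) by ring, foldl_stepP_shift]
    ring_nf
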